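-- pv_equiv track=rewrite | github.com/grislyevan/agentic-governance | api/webhooks/dispatcher.py | _sanitize_cmdline
-- ===== SOURCE A (Python) =====
-- _SECRET_PATTERNS = (
--     "--api-key", "--api_key", "--secret", "--password", "--token",
--     "API_KEY=", "SECRET=", "PASSWORD=", "TOKEN=",
-- )
--
-- _MAX_CMDLINE_LEN = 256
--
-- def _sanitize_cmdline(snippet: str | None) -> str | None:
--     if not snippet:
--         return snippet
--     if len(snippet) > _MAX_CMDLINE_LEN:
--         snippet = snippet[:_MAX_CMDLINE_LEN] + "..."
--     for pat in _SECRET_PATTERNS: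
--         if pat.lower() in snippet.lower():
--             snippet = "[redacted: may contain secrets]"
--             break
--     return snippet
-- ===== SOURCE B (Python) =====
-- _SECRET_PATTERNS = (
--     "--api-key", "--api_key", "--secret", "--password", "--token",
--     "API_KEY=", "SECRET=", "PASSWORD=", "TOKEN=",
-- )
--
-- _MAX_CMDLINE_LEN = 256
--
-- # every pattern is anchored: it starts with a double dash or ends with an equals sign
-- _DASH_WORDS = ("api-key", "api_key", "secret", "password", "token")
-- _EQ_WORDS = ("api_key", "secret", "password", "token")
--
--
-- def _sanitize_cmdline(snippet):
--     if not snippet: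
--         return snippet
--     snippet = snippet if len(snippet) <= _MAX_CMDLINE_LEN else snippet[:_MAX_CMDLINE_LEN] + "..."
--     low = snippet.lower()
--     # anchored scan: only look at '-' and '=' characters, checking forward after
--     # "--" and backward before "=", instead of searching each whole pattern
--     for i, ch in enumerate(low):
--         if ch == '-':
--             if low.startswith('--', i) and any(low.startswith(w, i + 2) for w in _DASH_WORDS):
--                 return "[redacted: may contain secrets]"
--         elif ch == '=':
--             if any(low.endswith(w, 0, i) for w in _EQ_WORDS):
--                 return "[redacted: may contain secrets]"
--     return snippet
-- ===== Notes on version B (the rewrite author's own statement) =====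
-- stated objective: alternative
-- what changed: Replaces A's per-pattern lowered-substring scans by a single anchored pass: every secret pattern either starts with a double dash or ends with an equals sign, so B walks the lowered snippet once and only checks the dash-words forward after a double dash and the eq-words backward before an equals sign.
import Mathlib
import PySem

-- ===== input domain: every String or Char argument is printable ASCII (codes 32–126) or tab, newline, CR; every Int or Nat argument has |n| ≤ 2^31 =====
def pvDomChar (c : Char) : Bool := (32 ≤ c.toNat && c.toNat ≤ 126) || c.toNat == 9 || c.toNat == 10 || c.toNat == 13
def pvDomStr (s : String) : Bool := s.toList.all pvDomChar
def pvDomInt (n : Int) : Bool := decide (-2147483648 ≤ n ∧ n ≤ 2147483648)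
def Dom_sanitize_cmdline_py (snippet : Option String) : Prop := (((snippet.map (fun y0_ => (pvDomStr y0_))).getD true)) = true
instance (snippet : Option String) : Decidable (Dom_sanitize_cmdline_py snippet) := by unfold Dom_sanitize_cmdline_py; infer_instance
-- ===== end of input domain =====

-- B replaces A's per-pattern lowered-substring scans with one anchored pass over the lowered
-- snippet: every pattern starts with a double dash or ends with an equals sign, so B only checks
-- dash-words forward after a double dash and eq-words backward before an equals sign (alternative).


-- ===== PORT A =====
def secretPatterns : List String :=
  ["--api-key", "--api_key", "--secret", "--password", "--token",
   "API_KEY=", "SECRET=", "PASSWORD=", "TOKEN="]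

def maxCmdlineLen : Int := 256

def redactedMsg : List Char := "[redacted: may contain secrets]".toList

-- 'for pat in _SECRET_PATTERNS: if pat.lower() in snippet.lower(): snippet = …; break'
def aPatLoop (pats : List String) (cs : List Char) : List Char :=
  match pats with
  | [] => cs
  | p :: rest =>
      if PySem.Chars.isIn (PySem.Chars.lower p.toList) (PySem.Chars.lower cs) then redactedMsg
      else aPatLoop rest cs

def sanitize_cmdline_py (snippet : Option String) : Option String :=
  match snippet with
  | none => none
  | some s =>
      let cs := s.toList
      if PySem.Chars.len cs = 0 then some s
      else
        let cs := if (PySem.Chars.len cs : Int) > maxCmdlineLen then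
            PySem.Chars.slice cs none (some maxCmdlineLen) ++ "...".toList
          else cs
        some (String.ofList (aPatLoop secretPatterns cs))

-- ===== PORT B =====
def dashWords : List (List Char) :=
  ["api-key".toList, "api_key".toList, "secret".toList, "password".toList, "token".toList]

def eqWords : List (List Char) :=
  ["api_key".toList, "secret".toList, "password".toList, "token".toList]

def redactedStr : String := "[redacted: may contain secrets]"

-- 'for i, ch in enumerate(low): …' — the index split low[:i] / low[i:] is carried as
-- (pre = reversed low[:i], rest = low[i:]); low.startswith(w, i+2) tests w against rest
-- after the two dashes, low.endswith(w, 0, i) tests w.reverse against pre. Exact.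
def bAnchorScan (pre rest : List Char) : Bool :=
  match rest with
  | [] => false
  | ch :: tl =>
      (if ch = '-' then
        PySem.Chars.startswith (ch :: tl) ['-', '-'] &&
          dashWords.any (fun w => PySem.Chars.startswith (tl.drop 1) w)
       else if ch = '=' then
        eqWords.any (fun w => PySem.Chars.startswith pre w.reverse)
       else false)
      || bAnchorScan (ch :: pre) tl

def sanitize_cmdline_py_alt (snippet : Option String) : Option String :=
  match snippet with
  | none => none
  | some s =>
      let cs := s.toList
      if PySem.Chars.len cs = 0 then some s
      else
        let t := if (PySem.Chars.len cs : Int) ≤ 256 then cs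
          else PySem.Chars.slice cs none (some 256) ++ "...".toList
        if bAnchorScan [] (PySem.Chars.lower t) then some redactedStr
        else some (String.ofList t)

-- ===== PRECONDITION & SPEC =====
def Spec_sanitize_cmdline_py (snippet : Option String) (out : Option String) : Prop := out = sanitize_cmdline_py_alt snippet
instance (snippet : Option String) (out : Option String) : Decidable (Spec_sanitize_cmdline_py snippet out) := by unfold Spec_sanitize_cmdline_py; infer_instance

-- ===== CLAIM (what is proved, stated in full; the proofs are below) =====
def Claim_equal_sanitize_cmdline_py : Prop := ∀ (snippet : Option String), Dom_sanitize_cmdline_py snippet → Spec_sanitize_cmdline_py snippet (sanitize_cmdline_py snippet)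

-- ===== LEMMAS AND PROOFS =====

-- A's loop redacts iff some pattern (lowered) occurs in the lowered snippet
theorem aPatLoop_eq (pats : List String) (cs : List Char) :
    aPatLoop pats cs =
      if pats.any (fun p => PySem.Chars.isIn (PySem.Chars.lower p.toList) (PySem.Chars.lower cs))
      then redactedMsg else cs := by
  induction pats with
  | nil => simp [aPatLoop]
  | cons p rest ih =>
      simp only [aPatLoop, List.any_cons, Bool.or_eq_true]
      by_cases h : PySem.Chars.isIn (PySem.Chars.lower p.toList) (PySem.Chars.lower cs) = true
      · simp [h]
      · simp [h, ih]

-- w ++ [c] occurs in s iff s splits at some c with w a suffix of the part before it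
theorem infix_append_singleton_iff (w s : List Char) (c : Char) :
    (w ++ [c]) <:+: s ↔ ∃ a b, s = a ++ c :: b ∧ w <:+ a := by
  constructor
  · rintro ⟨u, v, rfl⟩
    exact ⟨u ++ w, v, by simp, (List.suffix_append u w)⟩
  · rintro ⟨a, b, rfl, a', rfl⟩
    exact ⟨a', b, by simp⟩

-- the invariant of B's anchored scan
theorem bAnchorScan_iff (rest pre : List Char) :
    bAnchorScan pre rest = true ↔
      (∃ w ∈ dashWords, ('-' :: '-' :: w) <:+: rest) ∨
      (∃ w ∈ eqWords, ∃ a b, rest = a ++ '=' :: b ∧ w <:+ (pre.reverse ++ a)) := by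
  induction rest generalizing pre with
  | nil =>
      simp only [bAnchorScan, Bool.false_eq_true, false_iff]
      rintro (⟨w, _, h⟩ | ⟨w, _, a, b, h, _⟩)
      · exact absurd (List.eq_nil_of_infix_nil h) (by simp)
      · exact absurd h (by simp)
  | cons ch tl ih =>
      simp only [bAnchorScan, Bool.or_eq_true, ih]
      constructor
      · rintro (hhit | (⟨w, hw, h⟩ | ⟨w, hw, a, b, hsplit, hsuf⟩))
        · split_ifs at hhit with hdash heqc
          · -- ch = '-' and the "--" + dash-word test fired
            subst hdash
            rw [Bool.and_eq_true] at hhit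
            obtain ⟨hsw2, hany⟩ := hhit
            rw [PySem.Chars.startswith_iff] at hsw2
            obtain ⟨r, hr⟩ := hsw2
            obtain rfl : tl = '-' :: r := by simpa using hr.symm
            simp only [List.any_eq_true] at hany
            obtain ⟨w, hw, hsw⟩ := hany
            rw [PySem.Chars.startswith_iff] at hsw
            obtain ⟨r3, hr3⟩ := hsw
            simp only [List.drop_succ_cons, List.drop_zero] at hr3
            exact Or.inl ⟨w, hw, ⟨[], r3, by simp [hr3]⟩⟩
          · -- ch = '=' and some eq-word ends just before it
            subst heqc
            simp only [List.any_eq_true] at hhit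
            obtain ⟨w, hw, hsw⟩ := hhit
            rw [PySem.Chars.startswith_iff] at hsw
            refine Or.inr ⟨w, hw, [], tl, by simp, ?_⟩
            simpa using List.reverse_prefix.mp (by simpa using hsw)
        · exact Or.inl ⟨w, hw, h.trans (List.suffix_cons ch tl).isInfix⟩
        · refine Or.inr ⟨w, hw, ch :: a, b, by simp [hsplit], ?_⟩
          simpa using hsuf
      · rintro (⟨w, hw, h⟩ | ⟨w, hw, a, b, hsplit, hsuf⟩)
        · rw [List.infix_cons_iff] at h
          rcases h with hpre | hin
          · obtain ⟨r3, hr3⟩ := hpre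
            simp only [List.cons_append] at hr3
            obtain ⟨rfl, rfl⟩ : ch = '-' ∧ tl = '-' :: (w ++ r3) := by
              refine ⟨(List.cons.injEq ..).mp hr3 |>.1.symm, ?_⟩
              exact ((List.cons.injEq ..).mp hr3).2.symm
            refine Or.inl ?_
            rw [if_pos rfl, Bool.and_eq_true]
            constructor
            · rw [PySem.Chars.startswith_iff]
              exact ⟨w ++ r3, by simp⟩
            · refine List.any_eq_true.mpr ⟨w, hw, ?_⟩
              rw [PySem.Chars.startswith_iff]
              simp
          · exact Or.inr (Or.inl ⟨w, hw, hin⟩)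
        · match a, hsplit with
          | [], hsplit =>
              obtain ⟨rfl, rfl⟩ : ch = '=' ∧ tl = b :=
                ⟨((List.cons.injEq ..).mp hsplit).1, ((List.cons.injEq ..).mp hsplit).2⟩
              refine Or.inl ?_
              rw [if_neg (by decide), if_pos rfl]
              refine List.any_eq_true.mpr ⟨w, hw, ?_⟩
              rw [PySem.Chars.startswith_iff, ← List.reverse_reverse pre]
              exact List.reverse_prefix.mpr (by simpa using hsuf)
          | a0 :: a', hsplit =>
              obtain ⟨rfl, htl⟩ : ch = a0 ∧ tl = a' ++ '=' :: b :=
                ⟨((List.cons.injEq ..).mp hsplit).1, ((List.cons.injEq ..).mp hsplit).2⟩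
              exact Or.inr (Or.inr ⟨w, hw, a', b, htl, by simpa using hsuf⟩)

-- B's anchored scan fires exactly when A's substring test over the 9 patterns does
theorem bAnchorScan_eq_any (low : List Char) :
    bAnchorScan [] low =
      secretPatterns.any (fun p => PySem.Chars.isIn (PySem.Chars.lower p.toList) low) := by
  rw [Bool.eq_iff_iff, bAnchorScan_iff]
  have heq : ∀ w ∈ eqWords, ((∃ a b, low = a ++ '=' :: b ∧ w <:+ a) ↔ (w ++ ['=']) <:+: low) := by
    intro w _
    rw [infix_append_singleton_iff]
  simp only [List.any_eq_true, PySem.Chars.isIn_iff_infix]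
  constructor
  · rintro (⟨w, hw, h⟩ | ⟨w, hw, a, b, hsplit, hsuf⟩)
    · fin_cases hw
      · exact ⟨"--api-key", by decide, h⟩
      · exact ⟨"--api_key", by decide, h⟩
      · exact ⟨"--secret", by decide, h⟩
      · exact ⟨"--password", by decide, h⟩
      · exact ⟨"--token", by decide, h⟩
    · have h : (w ++ ['=']) <:+: low := (heq w hw).mp ⟨a, b, hsplit, by simpa using hsuf⟩
      fin_cases hw
      · exact ⟨"API_KEY=", by decide, h⟩
      · exact ⟨"SECRET=", by decide, h⟩
      · exact ⟨"PASSWORD=", by decide, h⟩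
      · exact ⟨"TOKEN=", by decide, h⟩
  · rintro ⟨p, hp, h⟩
    fin_cases hp
    · exact Or.inl ⟨"api-key".toList, by decide, h⟩
    · exact Or.inl ⟨"api_key".toList, by decide, h⟩
    · exact Or.inl ⟨"secret".toList, by decide, h⟩
    · exact Or.inl ⟨"password".toList, by decide, h⟩
    · exact Or.inl ⟨"token".toList, by decide, h⟩
    · exact Or.inr (by
        have := (heq "api_key".toList (by decide)).mpr h
        obtain ⟨a, b, hs, hw⟩ := this
        exact ⟨"api_key".toList, by decide, a, b, hs, by simpa using hw⟩)
    · exact Or.inr (by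
        have := (heq "secret".toList (by decide)).mpr h
        obtain ⟨a, b, hs, hw⟩ := this
        exact ⟨"secret".toList, by decide, a, b, hs, by simpa using hw⟩)
    · exact Or.inr (by
        have := (heq "password".toList (by decide)).mpr h
        obtain ⟨a, b, hs, hw⟩ := this
        exact ⟨"password".toList, by decide, a, b, hs, by simpa using hw⟩)
    · exact Or.inr (by
        have := (heq "token".toList (by decide)).mpr h
        obtain ⟨a, b, hs, hw⟩ := this
        exact ⟨"token".toList, by decide, a, b, hs, by simpa using hw⟩)

-- ===== VERDICT (by name: the statement is the Claim_ definition above) =====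
theorem sanitize_cmdline_py_spec : Claim_equal_sanitize_cmdline_py := by
  intro snippet _
  unfold Spec_sanitize_cmdline_py
  match snippet with
  | none => rfl
  | some s =>
      show sanitize_cmdline_py (some s) = sanitize_cmdline_py_alt (some s)
      unfold sanitize_cmdline_py sanitize_cmdline_py_alt
      dsimp only
      by_cases h0 : PySem.Chars.len s.toList = 0
      · rw [if_pos h0, if_pos h0]
      · rw [if_neg h0, if_neg h0]
        have htr : (if (PySem.Chars.len s.toList : Int) > maxCmdlineLen then
              PySem.Chars.slice s.toList none (some maxCmdlineLen) ++ "...".toList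
            else s.toList)
            = (if (PySem.Chars.len s.toList : Int) ≤ 256 then s.toList
            else PySem.Chars.slice s.toList none (some 256) ++ "...".toList) := by
          by_cases hl : (PySem.Chars.len s.toList : Int) ≤ 256
          · rw [if_pos hl, if_neg (by simpa [maxCmdlineLen] using not_lt.mpr hl)]
          · rw [if_pos (by simpa [maxCmdlineLen] using lt_of_not_ge hl), if_neg hl]
            rfl
        rw [htr, aPatLoop_eq, bAnchorScan_eq_any]
        set t := (if (PySem.Chars.len s.toList : Int) ≤ 256 then s.toList
            else PySem.Chars.slice s.toList none (some 256) ++ "...".toList) with ht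
        by_cases hc : (secretPatterns.any fun p =>
            PySem.Chars.isIn (PySem.Chars.lower p.toList) (PySem.Chars.lower t)) = true
        · rw [if_pos hc, if_pos hc]; rfl
        · rw [if_neg hc, if_neg hc]
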